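-- pv_equiv track=rewrite | github.com/PrateekKumar15/Speech_Understanding_Assignment2 | src/phonetics/hinglish_ipa.py | _latin_token_to_ipa
-- ===== SOURCE A (Python) =====
-- from typing import Dict, List
--
-- LATIN_TO_IPA: Dict[str, str] = {
--     "a": "ə",
--     "aa": "aː",
--     "i": "ɪ",
--     "ee": "iː",
--     "u": "ʊ",
--     "oo": "uː",
--     "e": "e",
--     "o": "o",
--     "k": "k",
--     "kh": "kʰ",
--     "g": "ɡ",
--     "gh": "ɡʱ",
--     "ch": "t͡ʃ",
--     "j": "d͡ʒ",
--     "t": "t̪",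
--     "d": "d̪",
--     "th": "t̪ʰ",
--     "dh": "d̪ʱ",
--     "n": "n",
--     "p": "p",
--     "ph": "pʰ",
--     "b": "b",
--     "bh": "bʱ",
--     "m": "m",
--     "r": "r",
--     "l": "l",
--     "v": "ʋ",
--     "s": "s",
--     "sh": "ʃ",
--     "h": "ɦ",
-- }
--
-- def _latin_token_to_ipa(token: str) -> str:
--     token = token.lower()
--     i = 0
--     out: List[str] = []
--     while i < len(token):
--         if i + 1 < len(token) and token[i : i + 2] in LATIN_TO_IPA:
--             out.append(LATIN_TO_IPA[token[i : i + 2]])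
--             i += 2
--             continue
--         out.append(LATIN_TO_IPA.get(token[i], token[i]))
--         i += 1
--     return "".join(out)
-- ===== SOURCE B (Python) =====
-- from typing import Dict, List
--
-- LATIN_TO_IPA: Dict[str, str] = {
--     "a": "ə",
--     "aa": "aː",
--     "i": "ɪ",
--     "ee": "iː",
--     "u": "ʊ",
--     "oo": "uː",
--     "e": "e",
--     "o": "o",
--     "k": "k",
--     "kh": "kʰ",
--     "g": "ɡ",
--     "gh": "ɡʱ",
--     "ch": "t͡ʃ",
--     "j": "d͡ʒ",
--     "t": "t̪",
--     "d": "d̪",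
--     "th": "t̪ʰ",
--     "dh": "d̪ʱ",
--     "n": "n",
--     "p": "p",
--     "ph": "pʰ",
--     "b": "b",
--     "bh": "bʱ",
--     "m": "m",
--     "r": "r",
--     "l": "l",
--     "v": "ʋ",
--     "s": "s",
--     "sh": "ʃ",
--     "h": "ɦ",
-- }
--
-- def _latin_token_to_ipa(token: str) -> str:
--     # One pass over the characters with a one-char pending state (no indexing/slicing):
--     # a pending char fuses with the next char when the pair is a digraph key,
--     # otherwise it is flushed through the single-char mapping.
--     out: List[str] = []
--     pend = None
--     for c in token.lower():
--         if pend is not None and pend + c in LATIN_TO_IPA: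
--             out.append(LATIN_TO_IPA[pend + c])
--             pend = None
--         else:
--             if pend is not None:
--                 out.append(LATIN_TO_IPA.get(pend, pend))
--             pend = c
--     if pend is not None:
--         out.append(LATIN_TO_IPA.get(pend, pend))
--     return "".join(out)
-- ===== Notes on version B (the rewrite author's own statement) =====
-- stated objective: alternative
-- what changed: Replaced A's index-based while loop with slicing (token[i:i+2]) by a single for-each pass over the characters that carries a one-char pending state (a small automaton): a pending char fuses with the next char when the pair is a digraph key, otherwise it is flushed through the single-char mapping; no indexing or slicing remains.
import Mathlib
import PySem

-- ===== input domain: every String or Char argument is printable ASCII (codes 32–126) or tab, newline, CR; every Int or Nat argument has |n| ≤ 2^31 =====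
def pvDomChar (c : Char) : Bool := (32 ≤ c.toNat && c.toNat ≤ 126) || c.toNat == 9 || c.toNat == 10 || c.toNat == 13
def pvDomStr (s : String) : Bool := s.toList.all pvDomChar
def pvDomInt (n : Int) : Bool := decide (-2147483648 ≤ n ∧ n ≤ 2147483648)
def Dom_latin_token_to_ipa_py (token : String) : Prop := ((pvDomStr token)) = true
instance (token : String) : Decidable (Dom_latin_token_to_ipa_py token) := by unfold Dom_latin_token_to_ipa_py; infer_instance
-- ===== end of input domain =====

-- B replaces A's index-and-slice while loop by a single for-each pass with a one-char pending state
-- (a two-state automaton); same result, no indexing or slicing — objective: alternative decomposition.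

-- the module-level dict, shared context of both programs
def LATIN_TO_IPA : PySem.Dict String String := PySem.Dict.ofList [
  ("a", "ə"), ("aa", "aː"), ("i", "ɪ"), ("ee", "iː"), ("u", "ʊ"), ("oo", "uː"),
  ("e", "e"), ("o", "o"), ("k", "k"), ("kh", "kʰ"), ("g", "ɡ"), ("gh", "ɡʱ"),
  ("ch", "t͡ʃ"), ("j", "d͡ʒ"), ("t", "t̪"), ("d", "d̪"), ("th", "t̪ʰ"), ("dh", "d̪ʱ"),
  ("n", "n"), ("p", "p"), ("ph", "pʰ"), ("b", "b"), ("bh", "bʱ"), ("m", "m"),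
  ("r", "r"), ("l", "l"), ("v", "ʋ"), ("s", "s"), ("sh", "ʃ"), ("h", "ɦ")]

-- ===== PORT A =====
-- A's while loop over the lowered token, ported on List Char with index i:
-- token[i:i+2] = (cs.drop i).take 2 (exact for the nonnegative in-loop i), token[i] = cs[i]
-- under the loop guard i < len; membership 'in' = Dict.contains, d[key] under that guard = getD key "";
-- out is the list of appended strings (as char lists), ''.join(out) = PySem.Chars.join [].
def latinIpaLoop (cs : List Char) (i : Nat) (out : List (List Char)) : List (List Char) :=
  if h : i < cs.length then
    if i + 1 < cs.length ∧ LATIN_TO_IPA.contains (String.mk ((cs.drop i).take 2)) = true then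
      latinIpaLoop cs (i + 2) (out ++ [(LATIN_TO_IPA.getD (String.mk ((cs.drop i).take 2)) "").toList])
    else
      latinIpaLoop cs (i + 1) (out ++ [(LATIN_TO_IPA.getD (String.mk [cs[i]]) (String.mk [cs[i]])).toList])
  else out
  termination_by cs.length - i
  decreasing_by all_goals omega

def latin_token_to_ipa_py (token : String) : String :=
  String.mk (PySem.Chars.join [] (latinIpaLoop (PySem.Str.lower token).toList 0 []))

-- ===== PORT B =====
-- B's single pass: fold over the lowered characters carrying (out, pending char), then flush.
def latinIpaStep (st : List (List Char) × Option Char) (c : Char) : List (List Char) × Option Char :=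
  match st.2 with
  | some p =>
    if LATIN_TO_IPA.contains (String.mk [p, c]) = true then
      (st.1 ++ [(LATIN_TO_IPA.getD (String.mk [p, c]) "").toList], none)
    else
      (st.1 ++ [(LATIN_TO_IPA.getD (String.mk [p]) (String.mk [p])).toList], some c)
  | none => (st.1, some c)

def latinIpaFlush (st : List (List Char) × Option Char) : List (List Char) :=
  match st.2 with
  | some p => st.1 ++ [(LATIN_TO_IPA.getD (String.mk [p]) (String.mk [p])).toList]
  | none => st.1

def latin_token_to_ipa_py_alt (token : String) : String :=
  String.mk (PySem.Chars.join []
    (latinIpaFlush ((PySem.Str.lower token).toList.foldl latinIpaStep ([], none))))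

-- ===== PRECONDITION & SPEC =====
def Spec_latin_token_to_ipa_py (token : String) (out : String) : Prop := out = latin_token_to_ipa_py_alt token
instance (token : String) (out : String) : Decidable (Spec_latin_token_to_ipa_py token out) := by unfold Spec_latin_token_to_ipa_py; infer_instance

-- ===== CLAIM (what is proved, stated in full; the proofs are below) =====
def Claim_equal_latin_token_to_ipa_py : Prop := ∀ (token : String), Dom_latin_token_to_ipa_py token → Spec_latin_token_to_ipa_py token (latin_token_to_ipa_py token)

-- ===== LEMMAS AND PROOFS =====

-- proof-only reference form: the greedy longest-match transduction, structurally recursive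
def ipaGreedy : List Char → List Char
  | [] => []
  | [c] => (LATIN_TO_IPA.getD (String.mk [c]) (String.mk [c])).toList
  | a :: b :: rest =>
    if LATIN_TO_IPA.contains (String.mk [a, b]) = true then
      (LATIN_TO_IPA.getD (String.mk [a, b]) "").toList ++ ipaGreedy rest
    else
      (LATIN_TO_IPA.getD (String.mk [a]) (String.mk [a])).toList ++ ipaGreedy (b :: rest)

theorem join_nil_flat (l : List (List Char)) : PySem.Chars.join [] l = l.flatten := by
  induction l with
  | nil => simp [PySem.Chars.join_nil]
  | cons a t ih =>
    cases t with
    | nil => simp [PySem.Chars.join_singleton]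
    | cons b t' => rw [PySem.Chars.join_cons_cons, ih]; simp

theorem loop_eq_greedy (k : Nat) : ∀ (cs : List Char) (i : Nat) (out : List (List Char)),
    cs.length ≤ i + k →
    (latinIpaLoop cs i out).flatten = out.flatten ++ ipaGreedy (cs.drop i) := by
  induction k with
  | zero =>
    intro cs i out hk
    rw [latinIpaLoop, dif_neg (by omega), List.drop_of_length_le (by omega)]
    simp [ipaGreedy]
  | succ k ih =>
    intro cs i out hk
    by_cases h : i < cs.length
    · rw [latinIpaLoop, dif_pos h]
      by_cases h2 : i + 1 < cs.length ∧ LATIN_TO_IPA.contains (String.mk ((cs.drop i).take 2)) = true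
      · rw [if_pos h2]
        obtain ⟨hlt, hc⟩ := h2
        have hd1 : cs.drop i = cs[i] :: cs.drop (i + 1) := List.drop_eq_getElem_cons h
        have hd2 : cs.drop (i + 1) = cs[i + 1] :: cs.drop (i + 2) := List.drop_eq_getElem_cons hlt
        have ht : (cs.drop i).take 2 = [cs[i], cs[i + 1]] := by rw [hd1, hd2]; rfl
        rw [ih cs (i + 2) _ (by omega), ht, hd1, hd2]
        rw [ht] at hc
        simp [ipaGreedy, hc]
      · rw [if_neg h2]
        have hd1 : cs.drop i = cs[i] :: cs.drop (i + 1) := List.drop_eq_getElem_cons h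
        rw [ih cs (i + 1) _ (by omega), hd1]
        rcases hdrop : cs.drop (i + 1) with _ | ⟨b, rest⟩
        · simp [ipaGreedy]
        · have hlt : i + 1 < cs.length := by
            by_contra hge
            rw [List.drop_of_length_le (by omega)] at hdrop
            exact (List.cons_ne_nil b rest) hdrop.symm
          have hd2 : cs.drop (i + 1) = cs[i + 1] :: cs.drop (i + 2) := List.drop_eq_getElem_cons hlt
          have hb : b = cs[i + 1] := by rw [hdrop] at hd2; exact (List.cons.injEq ..▸ hd2).1
          have ht : (cs.drop i).take 2 = [cs[i], b] := by rw [hd1, hdrop]; rfl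
          have hc : LATIN_TO_IPA.contains (String.mk [cs[i], b]) = false := by
            rw [← Bool.not_eq_true]
            intro htr
            exact h2 ⟨hlt, by rwa [ht]⟩
          simp [ipaGreedy, hc]
    · rw [latinIpaLoop, dif_neg h, List.drop_of_length_le (by omega)]
      simp [ipaGreedy]

theorem foldl_eq_greedy : ∀ (cs : List Char) (out : List (List Char)) (p? : Option Char),
    (latinIpaFlush (cs.foldl latinIpaStep (out, p?))).flatten
      = out.flatten ++ ipaGreedy (p?.toList ++ cs) := by
  intro cs
  induction cs with
  | nil =>
    intro out p?
    cases p? <;> simp [latinIpaFlush, ipaGreedy]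
  | cons c cs ih =>
    intro out p?
    cases p? with
    | none => simp only [List.foldl_cons, latinIpaStep, ih, Option.toList]; rfl
    | some p =>
      simp only [List.foldl_cons, latinIpaStep]
      by_cases hc : LATIN_TO_IPA.contains (String.mk [p, c]) = true
      · rw [if_pos hc, ih]
        simp [ipaGreedy, hc]
      · rw [if_neg hc, ih]
        rw [Bool.not_eq_true] at hc
        simp [ipaGreedy, hc]

-- ===== VERDICT (by name: the statement is the Claim_ definition above) =====
theorem latin_token_to_ipa_py_spec : Claim_equal_latin_token_to_ipa_py := by
  intro token _
  unfold Spec_latin_token_to_ipa_py latin_token_to_ipa_py latin_token_to_ipa_py_alt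
  rw [join_nil_flat, join_nil_flat,
    loop_eq_greedy (PySem.Str.lower token).toList.length _ 0 [] (by omega),
    foldl_eq_greedy _ [] none]
  simp
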